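-- pv_equiv track=rewrite | github.com/hhalvorsen/AdventOfCode | Luke 23/main.py | shuffle_cups
-- ===== SOURCE A (Python) =====
-- def shuffle_cups(c):
--     front_cup = c[0]
--     next_three = c[1:4]
--     c = c[4:]
--     insert_number = front_cup - 1
--     while insert_number not in c:
--         insert_number -= 1
--         if insert_number < min(c):
--             insert_number = 9
--     insert_index = c.index(insert_number) + 1
--     for i in next_three:
--         c.insert(insert_index, i)
--         insert_index += 1
--     c.append(front_cup)
--     return c
-- ===== SOURCE B (Python) =====
-- def shuffle_cups(c):
--     front = c[0]
--     picked = c[1:4]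
--     rest = c[4:]
--     cands = [v for v in rest if v <= front - 1]
--     dest = max(cands) if cands else max(v for v in rest if v <= 9)
--     i = rest.index(dest) + 1
--     return rest[:i] + picked + rest[i:] + [front]
-- ===== Notes on version B (the rewrite author's own statement) =====
-- stated objective: alternative
-- what changed: B replaces A's decrement-one-at-a-time while loop (with wrap-to-9) by a closed-form destination pick (largest remaining cup <= front-1, else largest remaining cup <= 9) and replaces A's in-place insert loop by a single list splice.
import Mathlib
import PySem

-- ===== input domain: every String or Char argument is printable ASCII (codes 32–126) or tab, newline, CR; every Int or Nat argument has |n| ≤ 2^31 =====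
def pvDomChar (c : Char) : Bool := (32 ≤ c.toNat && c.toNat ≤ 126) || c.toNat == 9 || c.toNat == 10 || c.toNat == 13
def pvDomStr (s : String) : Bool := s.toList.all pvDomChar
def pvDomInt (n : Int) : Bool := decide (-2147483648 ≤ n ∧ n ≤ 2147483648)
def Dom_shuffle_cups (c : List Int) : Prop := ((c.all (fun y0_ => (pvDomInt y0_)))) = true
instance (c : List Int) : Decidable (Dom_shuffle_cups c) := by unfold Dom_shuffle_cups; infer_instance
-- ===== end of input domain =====

-- B replaces A's decrement-until-found while loop by a closed-form destination (largest
-- remaining cup ≤ front-1, else largest cup ≤ 9) and the insert-loop by a list splice.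

-- ===== PORT A =====
-- the while loop of A: fuel is a guard making the recursion total; under Pre_ it is never exhausted
def shuffleLoopA (c : List Int) (fuel : Nat) (n : Int) : Int :=
  match fuel with
  | 0 => n
  | Nat.succ f =>
    if n ∈ c then n
    else
      let n1 := n - 1
      let n2 := if n1 < (PySem.List.min? c (fun y => y)).getD 0 then 9 else n1
      shuffleLoopA c f n2

def shuffle_cups (c : List Int) : List Int :=
  let front := (PySem.List.pyGet? c 0).getD 0
  let next_three := PySem.List.slice c (some 1) (some 4)
  let c2 := PySem.List.slice c (some 4) none
  let m := (PySem.List.min? c2 (fun y => y)).getD 0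
  let insert_number := shuffleLoopA c2 ((front - 1 - m).toNat + (9 - m).toNat + 2) (front - 1)
  let insert_index : Int := ((PySem.List.index? c2 insert_number).getD 0 : Int) + 1
  let res := next_three.foldl
      (fun (st : List Int × Int) i => (PySem.List.insert st.1 st.2 i, st.2 + 1))
      (c2, insert_index)
  res.1 ++ [front]

-- ===== PORT B =====
def shuffle_cups_alt (c : List Int) : List Int :=
  let front := (PySem.List.pyGet? c 0).getD 0
  let picked := PySem.List.slice c (some 1) (some 4)
  let rest := PySem.List.slice c (some 4) none
  let cands := rest.filter (fun v => v ≤ front - 1)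
  let dest := match PySem.List.max? cands (fun y => y) with
              | some d => d
              | none => (PySem.List.max? (rest.filter (fun v => v ≤ 9)) (fun y => y)).getD 0
  let i := (PySem.List.index? rest dest).getD 0 + 1
  rest.take i ++ picked ++ rest.drop i ++ [front]

-- ===== PRECONDITION & SPEC =====
-- Pre_ excludes inputs where A never returns: with fewer than 5 cups A raises
-- (IndexError/ValueError on the empty tail), and when every remaining cup exceeds 9
-- A's wrap-to-9 loop never terminates.
def Pre_shuffle_cups (c : List Int) : Prop := 5 ≤ c.length ∧ ∃ v ∈ c.drop 4, v ≤ 9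
instance (c : List Int) : Decidable (Pre_shuffle_cups c) := by unfold Pre_shuffle_cups; infer_instance
def pvWitness_shuffle_cups : List Int := [3, 8, 9, 1, 2, 5, 4, 6, 7]

def Spec_shuffle_cups (c : List Int) (out : List Int) : Prop := out = shuffle_cups_alt c
instance (c : List Int) (out : List Int) : Decidable (Spec_shuffle_cups c out) := by unfold Spec_shuffle_cups; infer_instance

-- ===== CLAIM (what is proved, stated in full; the proofs are below) =====
def Claim_equal_shuffle_cups : Prop := ∀ (c : List Int), Dom_shuffle_cups c → Pre_shuffle_cups c → Spec_shuffle_cups c (shuffle_cups c)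

-- ===== LEMMAS AND PROOFS =====

theorem shuffleLoopA_succ (c : List Int) (f : Nat) (n : Int) :
    shuffleLoopA c (Nat.succ f) n
      = if n ∈ c then n
        else shuffleLoopA c f
          (if n - 1 < (PySem.List.min? c (fun y => y)).getD 0 then 9 else n - 1) := rfl

theorem max?_some_of_mem {x : Int} {l : List Int} (h : x ∈ l) :
    ∃ d, PySem.List.max? l (fun y => y) = some d := by
  cases h' : PySem.List.max? l (fun y => y) with
  | none => rw [PySem.List.max?_eq_none_iff] at h'; subst h'; simp at h
  | some d => exact ⟨d, rfl⟩

-- A's while loop, started at n ≥ min, returns the largest element of c not exceeding n.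
theorem shuffleLoopA_spec (c : List Int) (m : Int)
    (hm : PySem.List.min? c (fun y => y) = some m) :
    ∀ (fuel : Nat) (n : Int), m ≤ n → (n - m).toNat < fuel →
      shuffleLoopA c fuel n
        = (PySem.List.max? (c.filter (fun v => v ≤ n)) (fun y => y)).getD 0 := by
  have hmem : m ∈ c := PySem.List.min?_mem hm
  have hmin : ∀ y ∈ c, m ≤ y := PySem.List.min?_isMin hm
  intro fuel
  induction fuel with
  | zero => intro n _ h; omega
  | succ f ih =>
    intro n hmn hf
    by_cases hn : n ∈ c
    · -- loop exits; max of the filter is n itself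
      have hnf : n ∈ c.filter (fun v => v ≤ n) :=
        List.mem_filter.mpr ⟨hn, by simp⟩
      obtain ⟨d, hd⟩ := max?_some_of_mem hnf
      have hdmem := PySem.List.max?_mem hd
      have hdle : n ≤ d := PySem.List.max?_isMax hd n hnf
      have hdle' : d ≤ n := of_decide_eq_true (List.mem_filter.mp hdmem).2
      have hdn : d = n := le_antisymm hdle' hdle
      rw [shuffleLoopA_succ, if_pos hn, hd, hdn, Option.getD_some]
    · -- loop steps to n-1 (no wrap: m < n since n ∉ c)
      have hlt : m < n := lt_of_le_of_ne hmn (fun h => hn (h ▸ hmem))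
      have hstep : shuffleLoopA c (Nat.succ f) n = shuffleLoopA c f (n - 1) := by
        rw [shuffleLoopA_succ, if_neg hn, hm]
        simp only [Option.getD_some]
        rw [if_neg (by omega : ¬ (n - 1 < m))]
      have hfilter : c.filter (fun v => v ≤ n) = c.filter (fun v => v ≤ n - 1) := by
        apply List.filter_congr
        intro x hx
        have : x ≠ n := fun h => hn (h ▸ hx)
        simp only [decide_eq_decide]
        omega
      rw [hstep, hfilter]
      exact ih (n - 1) (by omega) (by omega)

-- the insert-loop of A is the splice B performs
theorem foldl_insert_splice (picked : List Int) :
    ∀ (l : List Int) (k : Nat), k ≤ l.length →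
      (picked.foldl (fun (st : List Int × Int) i => (PySem.List.insert st.1 st.2 i, st.2 + 1))
        (l, (k : Int))).1 = l.take k ++ picked ++ l.drop k := by
  induction picked with
  | nil => intro l k hk; simp
  | cons x xs ih =>
    intro l k hk
    have hins : PySem.List.insert l (k : Int) x = l.take k ++ x :: l.drop k :=
      PySem.List.insert_natCast l k x hk
    have hcast : ((k : Int) + 1) = ((k + 1 : Nat) : Int) := by push_cast; ring
    simp only [List.foldl_cons, hins, hcast]
    have hk1 : k + 1 ≤ (l.take k ++ x :: l.drop k).length := by
      simp; omega
    rw [ih (l.take k ++ x :: l.drop k) (k + 1) hk1]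
    have htk : (l.take k).length = k := by simp; omega
    have hkk : k + 1 - k = 1 := by omega
    have h1 : (l.take k ++ x :: l.drop k).take (k + 1) = l.take k ++ [x] := by
      rw [List.take_append, htk, hkk, List.take_of_length_le (by rw [htk]; omega)]
      simp
    have h2 : (l.take k ++ x :: l.drop k).drop (k + 1) = l.drop k := by
      rw [List.drop_append, htk, hkk, List.drop_of_length_le (by rw [htk]; omega)]
      simp
    rw [h1, h2]
    simp

theorem shuffle_cups_eq (c : List Int) (hpre : Pre_shuffle_cups c) :
    shuffle_cups c = shuffle_cups_alt c := by
  obtain ⟨hlen, v, hv, hv9⟩ := hpre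
  -- shared pieces
  set front := (PySem.List.pyGet? c 0).getD 0 with hfront
  set rest := PySem.List.slice c (some 4) none with hrest
  have hrest_drop : rest = c.drop 4 := by
    rw [hrest, PySem.List.slice_from c (a := 4) (by norm_num)]
    rfl
  have hvrest : v ∈ rest := by rw [hrest_drop]; exact hv
  have hrest_ne : rest ≠ [] := by intro h; rw [h] at hvrest; simp at hvrest
  obtain ⟨m, hm⟩ : ∃ m, PySem.List.min? rest (fun y => y) = some m := by
    cases h : PySem.List.min? rest (fun y => y) with
    | none => rw [PySem.List.min?_eq_none_iff] at h; exact absurd h hrest_ne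
    | some m => exact ⟨m, rfl⟩
    
  have hmmem : m ∈ rest := PySem.List.min?_mem hm
  have hmmin : ∀ y ∈ rest, m ≤ y := PySem.List.min?_isMin hm
  have hm9 : m ≤ 9 := le_trans (hmmin v hvrest) hv9
  -- the destination both sides compute
  set dest := (match PySem.List.max? (rest.filter (fun v => v ≤ front - 1)) (fun y => y) with
              | some d => d
              | none => (PySem.List.max? (rest.filter (fun v => v ≤ 9)) (fun y => y)).getD 0) with hdest
  have hloop : shuffleLoopA rest ((front - 1 - m).toNat + (9 - m).toNat + 2) (front - 1) = dest := by
    by_cases hc : m ≤ front - 1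
    · -- destination = largest remaining ≤ front-1
      rw [shuffleLoopA_spec rest m hm _ (front - 1) hc (by omega)]
      have hmf : m ∈ rest.filter (fun v => v ≤ front - 1) :=
        List.mem_filter.mpr ⟨hmmem, by simp only [decide_eq_true_eq]; omega⟩
      obtain ⟨d, hd⟩ := max?_some_of_mem hmf
      rw [hdest, hd]
      simp
    · -- front-1 below every remaining cup: one wrap to 9, then largest remaining ≤ 9
      have hne : front - 1 ∉ rest := fun h => hc (hmmin _ h)
      have hstep : shuffleLoopA rest ((front - 1 - m).toNat + (9 - m).toNat + 2) (front - 1)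
          = shuffleLoopA rest ((front - 1 - m).toNat + (9 - m).toNat + 1) 9 := by
        have hfe : (front - 1 - m).toNat + (9 - m).toNat + 2
            = Nat.succ ((front - 1 - m).toNat + (9 - m).toNat + 1) := rfl
        rw [hfe, shuffleLoopA_succ, if_neg hne, hm]
        simp only [Option.getD_some]
        rw [if_pos (by omega : front - 1 - 1 < m)]
      rw [hstep, shuffleLoopA_spec rest m hm _ 9 hm9 (by omega)]
      have hcand : rest.filter (fun v => v ≤ front - 1) = [] := by
        apply List.filter_eq_nil_iff.mpr
        intro x hx
        have := hmmin x hx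
        simp only [decide_eq_true_eq]
        omega
      rw [hdest, hcand]
      simp [PySem.List.max?]
  -- dest is in rest, so index? succeeds with a position < rest.length
  have hdmem : dest ∈ rest := by
    rw [hdest]
    cases h : PySem.List.max? (rest.filter (fun v => v ≤ front - 1)) (fun y => y) with
    | some d =>
      exact List.mem_of_mem_filter (PySem.List.max?_mem h)
    | none =>
      have hmf : m ∈ rest.filter (fun v => v ≤ 9) :=
        List.mem_filter.mpr ⟨hmmem, by simp only [decide_eq_true_eq]; omega⟩
      obtain ⟨d, hd⟩ := max?_some_of_mem hmf
      rw [hd, Option.getD_some]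
      exact List.mem_of_mem_filter (PySem.List.max?_mem hd)
  obtain ⟨j, hj⟩ : ∃ j, PySem.List.index? rest dest = some j := by
    cases h : PySem.List.index? rest dest with
    | none => rw [PySem.List.index?_eq_none_iff] at h; exact absurd hdmem h
    | some j => exact ⟨j, rfl⟩
  obtain ⟨hjlt, -, -⟩ := PySem.List.getElem_of_index?_eq_some hj
  -- unfold both sides (the let-chains of both ports are definitionally transparent)
  have hmA : (PySem.List.min? rest (fun y => y)).getD 0 = m := by rw [hm]; rfl
  show (List.foldl (fun (st : List Int × Int) i => (PySem.List.insert st.1 st.2 i, st.2 + 1))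
        (rest, ((PySem.List.index? rest (shuffleLoopA rest
          ((front - 1 - ((PySem.List.min? rest (fun y => y)).getD 0)).toNat
            + (9 - ((PySem.List.min? rest (fun y => y)).getD 0)).toNat + 2) (front - 1))).getD 0 : Int) + 1)
        (PySem.List.slice c (some 1) (some 4))).1 ++ [front]
    = rest.take ((PySem.List.index? rest dest).getD 0 + 1)
        ++ PySem.List.slice c (some 1) (some 4)
        ++ rest.drop ((PySem.List.index? rest dest).getD 0 + 1) ++ [front]
  rw [hmA, hloop, hj]
  have hcast : ((j : Int) + 1) = ((j + 1 : Nat) : Int) := by push_cast; ring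
  simp only [Option.getD_some, hcast]
  rw [foldl_insert_splice _ rest (j + 1) (by omega)]

-- ===== VERDICT (by name: the statement is the Claim_ definition above) =====
theorem shuffle_cups_spec : Claim_equal_shuffle_cups := by
  intro c _ hpre
  exact shuffle_cups_eq c hpre
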